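-- pv_equiv track=rewrite | github.com/nirdizati-research/predict-python | src/encoding/declare/declaretemplates.py | template_alternate_succession
-- ===== SOURCE A (Python) =====
-- def template_alternate_succession(trace, event_set):
--     """
--     A-B-A-B - ... always in pair
--     # TODO: is zipping and just checking respective one okay? Not likely?
--     :param trace:
--     :param event_set:
--     :return:
--     """
--
--     assert (len(event_set) == 2)
--
--     event_1 = event_set[0]
--     event_2 = event_set[1]
--
--     if (event_1 in trace) != (event_2 in trace):
--         return -1, False
--
--     if event_1 in trace and event_2 in trace:
--         event_1_positions = trace[event_1]
--         event_2_positions = trace[event_2]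
--
--         if len(event_1_positions) != len(event_2_positions):
--             return -1, False  # impossible if not same length
--
--         pos = -1
--         current_ind = 0
--         switch = False
--         while current_ind < len(event_1_positions):
--
--             # Use switch to know from which array to get next..
--             if switch:
--                 next_pos = event_2_positions[current_ind]
--                 current_ind += 1
--             else:
--                 next_pos = event_1_positions[current_ind]
--
--             if next_pos <= pos:
--                 return -1, False  # next one is smaller than current
--
--             pos = next_pos  # go to next one.
--             switch = not switch  # swap array
--
--         count = len(event_1_positions)
--         return count, False
--
--     return 0, True  # vacuity condition
-- ===== SOURCE B (Python) =====
-- def template_alternate_succession(trace, event_set):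
--     """Alternation A-B-A-B holds iff three independent pairwise conditions do:
--     the first A-position is >= 0, each A-position precedes its paired
--     B-position (a[i] < b[i]), and each B-position precedes the next
--     A-position (b[i] < a[i+1]).  No interleaved sequence or stateful walk."""
--     assert (len(event_set) == 2)
--
--     event_1, event_2 = event_set
--     in_1, in_2 = event_1 in trace, event_2 in trace
--
--     if in_1 != in_2:
--         return -1, False
--
--     if not in_1:
--         return 0, True  # vacuity condition
--
--     a = trace[event_1]
--     b = trace[event_2]
--
--     if len(a) != len(b):
--         return -1, False
--
--     ok = (not a or a[0] >= 0) \
--         and all(x < y for x, y in zip(a, b)) \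
--         and all(y < x for y, x in zip(b, a[1:]))
--     return (len(a), False) if ok else (-1, False)
-- ===== Notes on version B (the rewrite author's own statement) =====
-- stated objective: alternative
-- what changed: Replaced the stateful switch-driven walk over the merged order by a re-characterization of alternation as three independent pairwise conditions (a[0] >= 0, a[i] < b[i] within pairs, b[i] < a[i+1] across pairs), each checked by a separate zip comparison.
import Mathlib
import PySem

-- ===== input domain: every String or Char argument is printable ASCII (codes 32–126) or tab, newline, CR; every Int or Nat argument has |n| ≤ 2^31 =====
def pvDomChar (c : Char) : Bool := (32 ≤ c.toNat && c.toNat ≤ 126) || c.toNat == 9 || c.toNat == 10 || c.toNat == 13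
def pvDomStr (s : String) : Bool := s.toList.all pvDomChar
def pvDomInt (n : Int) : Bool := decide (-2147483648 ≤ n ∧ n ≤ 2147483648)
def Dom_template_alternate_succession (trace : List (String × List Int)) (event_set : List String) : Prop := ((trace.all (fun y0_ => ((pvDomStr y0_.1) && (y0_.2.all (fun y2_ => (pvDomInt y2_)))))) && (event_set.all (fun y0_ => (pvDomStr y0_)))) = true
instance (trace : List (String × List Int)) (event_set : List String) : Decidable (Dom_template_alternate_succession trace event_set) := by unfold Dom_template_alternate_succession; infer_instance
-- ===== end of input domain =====

-- B replaces A's stateful switch-driven walk by verifying three independent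
-- pairwise conditions (a[0] >= 0; a[i] < b[i]; b[i] < a[i+1]) — an alternative
-- characterization of the alternation pattern, no interleaved walk.


-- ===== PORT A =====
-- A's while loop: pos / current_ind / switch state, one step per iteration.
-- (b is only indexed at positions < a.length; the caller has checked the lengths
-- are equal, so the `.getD 0` default of the exact pyGet? is never used.)
def pvLoopA (a b : List Int) (pos : Int) (i : Nat) (switch : Bool) : Int × Bool :=
  if h : i < a.length then
    if switch then
      let next := (PySem.List.pyGet? b (i : Int)).getD 0
      if next ≤ pos then (-1, false)
      else pvLoopA a b next (i + 1) false
    else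
      let next := (PySem.List.pyGet? a (i : Int)).getD 0
      if next ≤ pos then (-1, false)
      else pvLoopA a b next i true
  else ((a.length : Int), false)
termination_by 2 * (a.length - i) + (if switch then 0 else 1)
decreasing_by all_goals simp_all <;> omega

def template_alternate_succession (trace : List (String × List Int)) (event_set : List String) : Int × Bool :=
  let d := PySem.Dict.mk trace
  let event_1 := (PySem.List.pyGet? event_set (0 : Int)).getD ""
  let event_2 := (PySem.List.pyGet? event_set (1 : Int)).getD ""
  if (d.contains event_1) != (d.contains event_2) then (-1, false)
  else if d.contains event_1 && d.contains event_2 then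
    let event_1_positions := (d.get? event_1).getD []
    let event_2_positions := (d.get? event_2).getD []
    if event_1_positions.length ≠ event_2_positions.length then (-1, false)
    else pvLoopA event_1_positions event_2_positions (-1) 0 false
  else (0, true)

-- ===== PORT B =====
-- all(x < y for x, y in zip(a, b))
def pvWithin (a b : List Int) : Bool := (a.zip b).all (fun p => decide (p.1 < p.2))
-- all(y < x for y, x in zip(b, a[1:]))
def pvCross (a b : List Int) : Bool := (b.zip a.tail).all (fun p => decide (p.1 < p.2))
-- not a or a[0] >= 0
def pvHeadOk (l : List Int) : Bool := match l with | [] => true | x :: _ => decide (0 ≤ x)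

def template_alternate_succession_alt (trace : List (String × List Int)) (event_set : List String) : Int × Bool :=
  let d := PySem.Dict.mk trace
  match event_set with
  | [event_1, event_2] =>
    if (d.contains event_1) != (d.contains event_2) then (-1, false)
    else if !(d.contains event_1) then (0, true)
    else
      let a := (d.get? event_1).getD []
      let b := (d.get? event_2).getD []
      if a.length ≠ b.length then (-1, false)
      else if pvHeadOk a && pvWithin a b && pvCross a b then ((a.length : Int), false)
      else (-1, false)
  | _ => (-1, false)  -- unreachable under Pre_ (the Python asserts len(event_set) == 2)

-- ===== PRECONDITION & SPEC =====
-- A asserts len(event_set) == 2 and raises AssertionError otherwise; Pre_ excludes exactly that.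
def Pre_template_alternate_succession (trace : List (String × List Int)) (event_set : List String) : Prop :=
  event_set.length = 2
instance (trace : List (String × List Int)) (event_set : List String) : Decidable (Pre_template_alternate_succession trace event_set) := by unfold Pre_template_alternate_succession; infer_instance

def pvWitness_template_alternate_succession : (List (String × List Int)) × List String :=
  ([("a", [0, 2]), ("b", [1, 3])], ["a", "b"])

def Spec_template_alternate_succession (trace : List (String × List Int)) (event_set : List String) (out : Int × Bool) : Prop := out = template_alternate_succession_alt trace event_set
instance (trace : List (String × List Int)) (event_set : List String) (out : Int × Bool) : Decidable (Spec_template_alternate_succession trace event_set out) := by unfold Spec_template_alternate_succession; infer_instance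

-- ===== CLAIM (what is proved, stated in full; the proofs are below) =====
def Claim_equal_template_alternate_succession : Prop := ∀ (trace : List (String × List Int)) (event_set : List String), Dom_template_alternate_succession trace event_set → Pre_template_alternate_succession trace event_set → Spec_template_alternate_succession trace event_set (template_alternate_succession trace event_set)

-- ===== LEMMAS AND PROOFS =====

-- proof-only bridge: the interleaving of the two lists, and a strict chain from pos
def pvMerged (a b : List Int) : List Int := (a.zip b).flatMap (fun p => [p.1, p.2])

def pvChain (pos : Int) (l : List Int) : Bool :=
  match l with
  | [] => true
  | x :: xs => decide (pos < x) && pvChain x xs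

-- A's loop computes the chain test on the interleaving of the two suffixes
theorem pvLoopA_eq (a b : List Int) (hlen : a.length = b.length) :
    ∀ (k i : Nat) (pos : Int), i + k = a.length →
      pvLoopA a b pos i false =
        (if pvChain pos (pvMerged (a.drop i) (b.drop i)) then ((a.length : Int), false)
         else (-1, false)) := by
  intro k
  induction k with
  | zero =>
    intro i pos hi
    rw [pvLoopA]
    simp [show ¬ i < a.length by omega, List.drop_eq_nil_of_le (by omega : a.length ≤ i),
      List.drop_eq_nil_of_le (by omega : b.length ≤ i), pvMerged, pvChain]
  | succ k ih =>
    intro i pos hi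
    have hia : i < a.length := by omega
    have hib : i < b.length := by omega
    have hga : (PySem.List.pyGet? a (i : Int)).getD 0 = a[i] := by
      simp [PySem.List.pyGet?, PySem.List.pyIdx?, hia]
    have hgb : (PySem.List.pyGet? b (i : Int)).getD 0 = b[i] := by
      simp [PySem.List.pyGet?, PySem.List.pyIdx?, hib]
    have hda : a.drop i = a[i] :: a.drop (i + 1) := List.drop_eq_getElem_cons hia
    have hdb : b.drop i = b[i] :: b.drop (i + 1) := List.drop_eq_getElem_cons hib
    rw [pvLoopA]
    simp only [hia, dif_pos, if_neg (by simp : ¬ (false = true)), hga]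
    rw [hda, hdb]
    simp only [pvMerged, List.zip_cons_cons, List.flatMap_cons]
    by_cases h1 : a[i] ≤ pos
    · simp [h1, pvChain, show ¬ pos < a[i] by omega]
    · rw [if_neg h1, pvLoopA]
      simp only [hia, dif_pos, hgb]
      by_cases h2 : b[i] ≤ a[i]
      · simp [h2, pvChain, show pos < a[i] by omega, show ¬ a[i] < b[i] by omega]
      · rw [if_neg h2, ih (i + 1) b[i] (by omega)]
        simp [pvMerged, pvChain, show pos < a[i] by omega, show a[i] < b[i] by omega]

-- head-of-a check relative to pos (internal to the next induction)
def pvHeadLt (pos : Int) (l : List Int) : Bool :=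
  match l with | [] => true | x :: _ => decide (pos < x)

-- the chain test on the interleaving decomposes into B's three pairwise conditions
theorem pvChain_merged (a : List Int) : ∀ (b : List Int) (pos : Int), a.length = b.length →
    pvChain pos (pvMerged a b) = (pvHeadLt pos a && pvWithin a b && pvCross a b) := by
  induction a with
  | nil =>
    intro b pos hlen
    have : b = [] := by cases b <;> simp_all
    subst this; rfl
  | cons x xs ih =>
    intro b pos hlen
    cases b with
    | nil => simp at hlen
    | cons y ys =>
      have h := ih ys y (by simpa using hlen)
      have hcross : pvCross (x :: xs) (y :: ys) = (pvHeadLt y xs && pvCross xs ys) := by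
        cases xs with
        | nil =>
          have : ys = [] := by cases ys <;> simp_all
          subst this; rfl
        | cons x2 xs' => simp [pvCross, pvHeadLt]
      have h' : pvChain y (pvMerged xs ys) = (pvHeadLt y xs && pvWithin xs ys && pvCross xs ys) := h
      have hhl : pvHeadLt pos (x :: xs) = decide (pos < x) := rfl
      simp only [pvMerged] at h'
      simp only [pvMerged, List.zip_cons_cons, List.flatMap_cons, List.cons_append,
        List.nil_append, pvChain, pvWithin, List.all_cons, hcross, hhl, h']
      cases decide (pos < x) <;> cases decide (x < y) <;> cases pvHeadLt y xs <;>
        cases (xs.zip ys).all (fun p => decide (p.1 < p.2)) <;> cases pvCross xs ys <;> rfl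

theorem pvLoop_main (a b : List Int) (hlen : a.length = b.length) :
    pvLoopA a b (-1) 0 false =
      (if pvHeadOk a && pvWithin a b && pvCross a b then ((a.length : Int), false)
       else (-1, false)) := by
  rw [pvLoopA_eq a b hlen a.length 0 (-1) (by omega)]
  simp only [List.drop_zero, pvChain_merged a b (-1) hlen]
  have : pvHeadLt (-1) a = pvHeadOk a := by
    cases a with
    | nil => rfl
    | cons x xs =>
      simp only [pvHeadLt, pvHeadOk]
      by_cases h : (0 : Int) ≤ x <;> simp [h] <;> omega
  rw [this]

-- ===== VERDICT (by name: the statement is the Claim_ definition above) =====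
theorem template_alternate_succession_spec : Claim_equal_template_alternate_succession := by
  intro trace event_set _hdom hpre
  unfold Spec_template_alternate_succession
  match event_set, hpre with
  | [e1, e2], _ =>
    have hg0 : (PySem.List.pyGet? [e1, e2] (0 : Int)).getD "" = e1 := by
      simp [PySem.List.pyGet?, PySem.List.pyIdx?]
    have hg1 : (PySem.List.pyGet? [e1, e2] (1 : Int)).getD "" = e2 := by
      simp [PySem.List.pyGet?, PySem.List.pyIdx?]
    unfold template_alternate_succession template_alternate_succession_alt
    simp only [hg0, hg1]
    set d := PySem.Dict.mk trace with hd
    cases hc1 : d.contains e1 <;> cases hc2 : d.contains e2 <;>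
      simp only [bne_self_eq_false, Bool.bne_true, Bool.bne_false, Bool.not_true,
        Bool.not_false, Bool.and_true, Bool.and_false, if_true, if_false,
        Bool.false_eq_true]
    by_cases hl : ((d.get? e1).getD []).length = ((d.get? e2).getD []).length
    · rw [if_neg (by omega), if_neg (by omega), pvLoop_main _ _ hl]
    · rw [if_pos (by omega), if_pos (by omega)]
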